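-- pv_equiv track=rewrite | github.com/bluesky/event-model | event_model/__init__.py | length_of_value
-- ===== SOURCE A (Python) =====
-- from typing import (
--     Any,
--     Callable,
--     Dict,
--     Generator,
--     Iterable,
--     Iterator,
--     List,
--     Optional,
--     Tuple,
--     Type,
--     Union,
--     cast,
--     no_type_check,
-- )
--
-- class EventModelError(Exception): ...
--
-- def length_of_value(dictionary: Dict[str, List], error_msg: str) -> Optional[int]:
--     length = None
--     for k, v in dictionary.items():
--         v_len = len(v)
--         if length is not None:
--             if v_len != length:
--                 raise EventModelError(error_msg)
--         length = v_len
--     return length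
-- ===== SOURCE B (Python) =====
-- class EventModelError(Exception): ...
--
-- def length_of_value(dictionary, error_msg):
--     lengths = [len(v) for v in dictionary.values()]
--     if not lengths:
--         return None
--     if min(lengths) != max(lengths):
--         raise EventModelError(error_msg)
--     return lengths[0]
-- ===== Notes on version B (the rewrite author's own statement) =====
-- stated objective: alternative
-- what changed: B materialises the list of value lengths once and decides consistency by comparing its extremes (min == max), then returns the first length, instead of A's single pass carrying a running scalar with a per-item None check and pairwise comparison.
import Mathlib
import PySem

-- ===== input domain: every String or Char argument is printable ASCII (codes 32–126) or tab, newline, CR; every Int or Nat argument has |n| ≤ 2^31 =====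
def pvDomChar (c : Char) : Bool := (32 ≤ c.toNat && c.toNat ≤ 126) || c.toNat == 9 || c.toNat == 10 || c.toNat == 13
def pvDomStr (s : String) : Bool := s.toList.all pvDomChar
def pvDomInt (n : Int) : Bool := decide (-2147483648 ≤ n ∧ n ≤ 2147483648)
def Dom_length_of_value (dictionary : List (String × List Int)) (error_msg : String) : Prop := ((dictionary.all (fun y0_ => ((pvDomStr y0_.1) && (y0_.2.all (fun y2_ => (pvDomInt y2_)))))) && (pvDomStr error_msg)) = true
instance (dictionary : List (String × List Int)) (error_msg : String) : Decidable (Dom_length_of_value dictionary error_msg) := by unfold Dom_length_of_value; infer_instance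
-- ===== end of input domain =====

-- B decides consistency by comparing the extremes (min == max) of the materialised length
-- list and returns its first element, replacing A's running-scalar pairwise-comparison loop.

-- ===== PORT A =====
-- A's for-loop over dictionary.items() with the running `length` accumulator.
-- `none` of the OUTER option marks the `raise EventModelError` path (excluded by Pre_).
def pvLoopA : List (String × List Int) → Option Int → Option (Option Int)
  | [], length => some length
  | (_, v) :: rest, length =>
      let vLen : Int := (v.length : Int)
      match length with
      | some l => if vLen ≠ l then none else pvLoopA rest (some vLen)
      | none => pvLoopA rest (some vLen)

def length_of_value (dictionary : List (String × List Int)) (error_msg : String) : Option Int :=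
  (pvLoopA dictionary none).getD none   -- the raise path never occurs under Pre_

-- ===== PORT B =====
-- lengths = [len(v) for v in dictionary.values()]; empty -> None; min(lengths) != max(lengths)
-- -> raise (modelled as `none`, excluded by Pre_); else lengths[0].
def length_of_value_alt (dictionary : List (String × List Int)) (error_msg : String) : Option Int :=
  let lengths : List Int := dictionary.map (fun p => (p.2.length : Int))
  if lengths = [] then none
  else if PySem.List.min? lengths (fun x => x) ≠ PySem.List.max? lengths (fun x => x)
  then none   -- raise path, never occurs under Pre_
  else lengths.head?

-- ===== PRECONDITION & SPEC =====
-- Pre_ excludes exactly the inputs where A (and B) raise EventModelError: two values of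
-- different lengths.
def Pre_length_of_value (dictionary : List (String × List Int)) (error_msg : String) : Prop :=
  (dictionary.map (fun p => (p.2.length : Int))).Pairwise (· = ·)
instance (dictionary : List (String × List Int)) (error_msg : String) : Decidable (Pre_length_of_value dictionary error_msg) := by unfold Pre_length_of_value; infer_instance

def pvWitness_length_of_value : (List (String × List Int)) × String :=
  ([("a", [1, 2]), ("b", [3, 4])], "err")

def Spec_length_of_value (dictionary : List (String × List Int)) (error_msg : String) (out : Option Int) : Prop := out = length_of_value_alt dictionary error_msg
instance (dictionary : List (String × List Int)) (error_msg : String) (out : Option Int) : Decidable (Spec_length_of_value dictionary error_msg out) := by unfold Spec_length_of_value; infer_instance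

-- ===== CLAIM (what is proved, stated in full; the proofs are below) =====
def Claim_equal_length_of_value : Prop := ∀ (dictionary : List (String × List Int)) (error_msg : String), Dom_length_of_value dictionary error_msg → Pre_length_of_value dictionary error_msg → Spec_length_of_value dictionary error_msg (length_of_value dictionary error_msg)

-- ===== LEMMAS AND PROOFS =====

-- A's loop, seeded with `some c` over values all of length c, returns `some (some c)`.
theorem pvLoopA_const (d : List (String × List Int)) (c : Int)
    (h : ∀ p ∈ d, (p.2.length : Int) = c) : pvLoopA d (some c) = some (some c) := by
  induction d with
  | nil => rfl
  | cons hd tl ih =>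
      have hhd : ((hd.2.length : Nat) : Int) = c := h hd (by simp)
      simp [pvLoopA, hhd]
      exact ih (fun p hp => h p (by simp [hp]))

-- running min/max over a constant list stay at c.
theorem foldl_min_const (xs : List Int) (c : Int) (h : ∀ x ∈ xs, x = c) :
    xs.foldl min c = c := by
  induction xs with
  | nil => rfl
  | cons x t ih =>
      have hx : x = c := h x (by simp)
      simp [hx, min_self]
      exact ih (fun y hy => h y (by simp [hy]))

theorem foldl_max_const (xs : List Int) (c : Int) (h : ∀ x ∈ xs, x = c) :
    xs.foldl max c = c := by
  induction xs with
  | nil => rfl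
  | cons x t ih =>
      have hx : x = c := h x (by simp)
      simp [hx, max_self]
      exact ih (fun y hy => h y (by simp [hy]))

theorem length_of_value_eq (dictionary : List (String × List Int)) (error_msg : String)
    (hpre : Pre_length_of_value dictionary error_msg) :
    length_of_value dictionary error_msg = length_of_value_alt dictionary error_msg := by
  unfold Pre_length_of_value at hpre
  cases dictionary with
  | nil => rfl
  | cons hd tl =>
      set c : Int := (hd.2.length : Int) with hc
      have hall : ∀ p ∈ tl, (p.2.length : Int) = c := by
        intro p hp
        have h2 := (List.pairwise_cons.mp hpre).1 (p.2.length : Int) (List.mem_map_of_mem hp)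
        rw [hc]
        exact h2.symm
      have hallmap : ∀ x ∈ tl.map (fun p => ((p.2.length : Nat) : Int)), x = c := by
        intro x hx
        simp only [List.mem_map] at hx
        rcases hx with ⟨p, hp, rfl⟩
        exact hall p hp
      unfold length_of_value length_of_value_alt
      rw [show pvLoopA (hd :: tl) none = pvLoopA tl (some c) from rfl,
          pvLoopA_const tl c hall]
      simp only [List.map_cons, List.head?]
      rw [PySem.List.min?_id_cons, PySem.List.max?_id_cons,
          foldl_min_const _ c hallmap, foldl_max_const _ c hallmap]
      simp [hc]

-- ===== VERDICT (by name: the statement is the Claim_ definition above) =====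
theorem length_of_value_spec : Claim_equal_length_of_value := by
  intro d e _ hpre
  exact length_of_value_eq d e hpre
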